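-- pv_equiv track=rewrite | github.com/syn-ack42/aoc2017 | src/d21.py | join_matrix_from_blockline
-- ===== SOURCE A (Python) =====
-- from math import sqrt
--
-- def join_matrix_from_blockline(bl):
--     blocks_per_side = int(sqrt(len(bl)))
--     dots_per_block = len(bl[0])
--     r = []
--
--     for by in range(blocks_per_side):
--         for y in range(dots_per_block):
--             line = []
--             for bx in range(blocks_per_side):
--                 line += bl[by*blocks_per_side + bx][y]
--             r.append(list(line))
--
--     return r
-- ===== SOURCE B (Python) =====
-- from math import sqrt
--
-- def join_matrix_from_blockline(bl):
--     bps = int(sqrt(len(bl)))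
--     dots = len(bl[0])
--     r = []
--     buf = [[] for _ in range(dots)]
--     count = 0
--     for blk in bl[:bps * bps]:
--         for y in range(dots):
--             buf[y] = buf[y] + list(blk[y])
--         count += 1
--         if count == bps:
--             r.extend(buf)
--             buf = [[] for _ in range(dots)]
--             count = 0
--     return r
-- ===== Notes on version B (the rewrite author's own statement) =====
-- stated objective: alternative
-- what changed: Replaces A's triple index-arithmetic loop (r built row group by row group via bl[by*bps+bx][y]) with a single streaming pass over the block list itself, maintaining an accumulator of dots partial rows and a counter, flushing the buffer into the result each time a block-row of bps blocks completes.
import Mathlib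
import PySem

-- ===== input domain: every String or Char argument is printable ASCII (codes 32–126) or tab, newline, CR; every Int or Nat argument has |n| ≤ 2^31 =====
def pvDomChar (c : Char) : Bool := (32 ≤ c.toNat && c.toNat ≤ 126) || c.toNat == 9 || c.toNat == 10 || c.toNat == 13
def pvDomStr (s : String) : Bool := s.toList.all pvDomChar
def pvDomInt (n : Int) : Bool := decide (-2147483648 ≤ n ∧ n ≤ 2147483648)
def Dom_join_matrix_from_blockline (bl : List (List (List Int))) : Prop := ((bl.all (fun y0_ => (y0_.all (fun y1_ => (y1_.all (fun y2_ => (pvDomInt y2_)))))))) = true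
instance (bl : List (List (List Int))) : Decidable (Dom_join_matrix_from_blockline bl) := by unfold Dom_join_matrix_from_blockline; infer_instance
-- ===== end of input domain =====

-- B replaces A's triple index-arithmetic loop by one streaming pass over the block
-- list with a partial-row buffer flushed per completed block-row (objective:
-- alternative; same asymptotic cost).

-- ===== PORT A =====
-- Literal port of A.  int(sqrt(len(bl))) → Nat.sqrt (exact for every feasible
-- list length); bl[0] → headD (empty bl raises IndexError in Python, excluded by
-- Pre_); in-range indexing bl[i][y] → getD (defaults never hit inside Pre_).
def join_matrix_from_blockline (bl : List (List (List Int))) : List (List Int) :=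
  let bps := Nat.sqrt bl.length
  let dots := (bl.headD []).length
  (List.range bps).foldl (fun r by_ =>
    (List.range dots).foldl (fun r y =>
      r ++ [(List.range bps).foldl (fun line bx =>
        line ++ ((bl.getD (by_ * bps + bx) []).getD y [])) ([] : List Int)]) r) []

-- ===== PORT B =====
-- Loop body of B: update the dots partial rows (the Python for-y loop mutating
-- buf[y], ported as a fold with List.set; blk[y] in range inside Pre_, getD's
-- default unreachable), bump the counter, flush when a block-row completes.
def bstep (dots bps : Nat)
    (st : List (List Int) × List (List Int) × Nat) (blk : List (List Int)) :
    List (List Int) × List (List Int) × Nat :=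
  let buf' := (List.range dots).foldl
      (fun b y => b.set y (b.getD y [] ++ blk.getD y [])) st.2.1
  if st.2.2 + 1 = bps then (st.1 ++ buf', List.replicate dots [], 0)
  else (st.1, buf', st.2.2 + 1)

-- Literal port of B: bl[:bps*bps] → take, the for-blk loop → foldl over the
-- state (r, buf, count); the function returns r, the first component.
def join_matrix_from_blockline_alt (bl : List (List (List Int))) : List (List Int) :=
  let bps := Nat.sqrt bl.length
  let dots := (bl.headD []).length
  ((bl.take (bps * bps)).foldl (bstep dots bps)
      (([] : List (List Int)), List.replicate dots ([] : List Int), 0)).1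

-- ===== PRECONDITION & SPEC =====
-- Pre_ is exactly the set of inputs on which Python A returns normally:
-- bl nonempty (else len(bl[0]) raises IndexError) and every block used by A
-- (the first sqrt(len)² blocks) has at least len(bl[0]) rows (else bl[i][y]
-- raises IndexError).
def Pre_join_matrix_from_blockline (bl : List (List (List Int))) : Prop :=
  bl ≠ [] ∧ ∀ i < Nat.sqrt bl.length * Nat.sqrt bl.length,
    (bl.headD []).length ≤ (bl.getD i []).length
instance (bl : List (List (List Int))) : Decidable (Pre_join_matrix_from_blockline bl) := by
  unfold Pre_join_matrix_from_blockline; infer_instance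
def pvWitness_join_matrix_from_blockline : List (List (List Int)) :=
  [[[1, 2], [3, 4]]]
def Spec_join_matrix_from_blockline (bl : List (List (List Int))) (out : List (List Int)) : Prop := out = join_matrix_from_blockline_alt bl
instance (bl : List (List (List Int))) (out : List (List Int)) : Decidable (Spec_join_matrix_from_blockline bl out) := by unfold Spec_join_matrix_from_blockline; infer_instance

-- ===== CLAIM (what is proved, stated in full; the proofs are below) =====
def Claim_equal_join_matrix_from_blockline : Prop := ∀ (bl : List (List (List Int))), Dom_join_matrix_from_blockline bl → Pre_join_matrix_from_blockline bl → Spec_join_matrix_from_blockline bl (join_matrix_from_blockline bl)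

-- ===== LEMMAS AND PROOFS =====

theorem foldl_app {α β : Type} (l : List α) (f : α → List β) :
    ∀ r : List β, l.foldl (fun r x => r ++ f x) r = r ++ l.flatMap f := by
  induction l with
  | nil => simp
  | cons a t ih => intro r; simp [List.foldl_cons, ih]

theorem range_getD_map {α β : Type} (l : List α) (d : α) (g : α → List β) :
    (List.range l.length).flatMap (fun i => g (l.getD i d)) = l.flatMap g := by
  induction l with
  | nil => simp
  | cons a t ih =>
    rw [List.length_cons, List.range_succ_eq_map, List.flatMap_cons, List.flatMap_map]
    simp only [List.getD_cons_zero, Nat.succ_eq_add_one,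
      List.getD_cons_succ, List.flatMap_cons]
    rw [ih]

theorem flatMap_single {α β : Type} (l : List α) (g : α → List β) :
    l.flatMap (fun x => [g x]) = l.map g := by
  induction l with
  | nil => simp
  | cons a t ih => simp [List.flatMap_cons, ih]

theorem flatMap_congr' {α β : Type} (l : List α) (f g : α → List β)
    (h : ∀ x ∈ l, f x = g x) : l.flatMap f = l.flatMap g := by
  induction l with
  | nil => simp
  | cons a t ih =>
    simp only [List.flatMap_cons, h a (by simp), ih (fun x hx => h x (by simp [hx]))]

theorem set_getD_append {α : Type} (L t : List α) (x e : α) (g : α → α) :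
    (L ++ x :: t).set L.length (g ((L ++ x :: t).getD L.length e)) = L ++ g x :: t := by
  induction L with
  | nil => simp
  | cons a L ih =>
    simp only [List.cons_append, List.length_cons, List.set_cons_succ,
      List.getD_cons_succ, ih]

-- Characterisation of B's inner for-y loop.
theorem bufstep_eq (blk : List (List Int)) (buf : List (List Int)) :
    ∀ d : Nat, d ≤ buf.length →
      (List.range d).foldl (fun b y => b.set y (b.getD y [] ++ blk.getD y [])) buf
      = (List.range d).map (fun y => buf.getD y [] ++ blk.getD y []) ++ buf.drop d := by
  intro d
  induction d with
  | zero => simp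
  | succ d ih =>
    intro hd
    rw [List.range_succ, List.foldl_append, ih (by omega), List.foldl_cons, List.foldl_nil]
    have hdrop : buf.drop d = buf[d] :: buf.drop (d + 1) :=
      List.drop_eq_getElem_cons (by omega)
    rw [hdrop]
    set L := (List.range d).map (fun y => buf.getD y [] ++ blk.getD y []) with hL
    have hlenmap : L.length = d := by rw [hL]; simp
    have key : (L ++ buf[d] :: buf.drop (d + 1)).set d
        ((L ++ buf[d] :: buf.drop (d + 1)).getD d [] ++ blk.getD d [])
        = L ++ (buf[d] ++ blk.getD d []) :: buf.drop (d + 1) := by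
      have h := set_getD_append L (buf.drop (d + 1)) (buf[d]) ([] : List Int)
        (fun z => z ++ blk.getD d [])
      rw [hlenmap] at h
      exact h
    rw [key, List.map_append]
    simp [hL, List.getD_eq_getElem?_getD,
      List.getElem?_eq_getElem (show d < buf.length by omega)]
    rfl

theorem getD_replicate_nil (dots y : Nat) :
    (List.replicate dots ([] : List Int)).getD y [] = [] := by
  simp [List.getD_eq_getElem?_getD, List.getElem?_replicate]
  split <;> rfl

-- One group of blocks completing a block-row: the buffer fills and flushes.
theorem group_fold (dots bps : Nat) :
    ∀ (g : List (List (List Int))) (c : Nat) (buf r : List (List Int)),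
      g ≠ [] → c + g.length = bps → buf.length = dots →
      g.foldl (bstep dots bps) (r, buf, c)
      = (r ++ (List.range dots).map
            (fun y => buf.getD y [] ++ g.flatMap (fun blk => blk.getD y [])),
         List.replicate dots ([] : List Int), 0) := by
  intro g
  induction g with
  | nil => intro c buf r hne; exact absurd rfl hne
  | cons blk rest ih =>
    intro c buf r _ hc hbuf
    have hbuf' : (List.range dots).foldl
        (fun b y => b.set y (b.getD y [] ++ blk.getD y [])) buf
        = (List.range dots).map (fun y => buf.getD y [] ++ blk.getD y []) := by
      rw [bufstep_eq blk buf dots (by omega)]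
      simp [hbuf]
    cases rest with
    | nil =>
      have hc1 : c + 1 = bps := by simpa using hc
      have h1 : bstep dots bps (r, buf, c) blk
          = (r ++ (List.range dots).map (fun y => buf.getD y [] ++ blk.getD y []),
             List.replicate dots ([] : List Int), 0) := by
        simp only [bstep, hbuf']
        rw [if_pos hc1]
      rw [List.foldl_cons, List.foldl_nil, h1]
      simp
    | cons b2 rest2 =>
      have hne2 : c + 1 ≠ bps := by
        simp only [List.length_cons] at hc; omega
      have h1 : bstep dots bps (r, buf, c) blk
          = (r, (List.range dots).map (fun y => buf.getD y [] ++ blk.getD y []), c + 1) := by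
        simp only [bstep, hbuf']
        rw [if_neg hne2]
      rw [List.foldl_cons, h1,
          ih (c + 1) _ r (by simp)
            (by simp only [List.length_cons] at hc ⊢; omega) (by simp)]
      congr 1
      congr 1
      apply List.map_congr_left
      intro y hy
      rw [List.mem_range] at hy
      rw [List.getD_eq_getElem _ _ (by simp [hy]), List.getElem_map, List.getElem_range]
      simp [List.flatMap_cons, List.append_assoc]

-- Folding over q complete groups of bps blocks.
theorem groups_fold (bl : List (List (List Int))) (dots bps : Nat)
    (hb : 1 ≤ bps) (hlen : bps * bps ≤ bl.length) :
    ∀ q : Nat, q ≤ bps →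
      ((bl.take (q * bps)).foldl (bstep dots bps)
          (([] : List (List Int)), List.replicate dots ([] : List Int), 0))
      = ((List.range q).flatMap (fun j => (List.range dots).map
            (fun y => ((bl.drop (j * bps)).take bps).flatMap
              (fun blk => blk.getD y []))),
         List.replicate dots ([] : List Int), 0) := by
  intro q
  induction q with
  | zero => simp
  | succ q ih =>
    intro hq
    have hstep : q * bps + bps ≤ bps * bps := by
      calc q * bps + bps = (q + 1) * bps := by ring
        _ ≤ bps * bps := Nat.mul_le_mul_right _ hq
    have hseglen : ((bl.drop (q * bps)).take bps).length = bps := by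
      rw [List.length_take, List.length_drop]; omega
    have hsegne : (bl.drop (q * bps)).take bps ≠ [] := by
      intro h; rw [h] at hseglen; simp at hseglen; omega
    have hsplit : bl.take ((q + 1) * bps)
        = bl.take (q * bps) ++ (bl.drop (q * bps)).take bps := by
      rw [show (q + 1) * bps = q * bps + bps by ring, List.take_add]
    rw [hsplit, List.foldl_append, ih (by omega),
        group_fold dots bps ((bl.drop (q * bps)).take bps) 0
          (List.replicate dots ([] : List Int)) _ hsegne (by simp [hseglen]) (by simp)]
    rw [List.range_succ, List.flatMap_append, List.flatMap_cons, List.flatMap_nil,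
        List.append_nil]
    congr 1
    congr 1
    apply List.map_congr_left
    intro y _
    rw [getD_replicate_nil, List.nil_append]

theorem join_matrix_from_blockline_spec : Claim_equal_join_matrix_from_blockline := by
  intro bl _ hpre
  have hne := hpre.1
  unfold Spec_join_matrix_from_blockline
  unfold join_matrix_from_blockline join_matrix_from_blockline_alt
  have hsq : Nat.sqrt bl.length * Nat.sqrt bl.length ≤ bl.length := by
    have h := Nat.sqrt_le' bl.length; rwa [pow_two] at h
  have hlpos : 1 ≤ bl.length := by
    cases bl with
    | nil => exact absurd rfl hne
    | cons a t => simp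
  have hbpos : 1 ≤ Nat.sqrt bl.length := by
    calc 1 = Nat.sqrt 1 := by simp
    _ ≤ Nat.sqrt bl.length := Nat.sqrt_le_sqrt hlpos
  simp only [foldl_app, List.nil_append]
  rw [groups_fold bl (bl.headD []).length (Nat.sqrt bl.length) hbpos hsq
        (Nat.sqrt bl.length) (le_refl _)]
  simp only [← flatMap_single]
  apply flatMap_congr'
  intro by_ hby
  rw [List.mem_range] at hby
  have hab : by_ * Nat.sqrt bl.length + Nat.sqrt bl.length ≤ bl.length := by
    have h1 : (by_ + 1) * Nat.sqrt bl.length ≤ Nat.sqrt bl.length * Nat.sqrt bl.length :=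
      Nat.mul_le_mul_right _ hby
    have h2 : (by_ + 1) * Nat.sqrt bl.length
        = by_ * Nat.sqrt bl.length + Nat.sqrt bl.length := by ring
    omega
  have hslen : ((bl.drop (by_ * Nat.sqrt bl.length)).take (Nat.sqrt bl.length)).length
      = Nat.sqrt bl.length := by
    rw [List.length_take, List.length_drop]; omega
  have hsget : ∀ j, j < Nat.sqrt bl.length →
      ((bl.drop (by_ * Nat.sqrt bl.length)).take (Nat.sqrt bl.length)).getD j []
      = bl.getD (by_ * Nat.sqrt bl.length + j) [] := by
    intro j hj
    have hj2 : by_ * Nat.sqrt bl.length + j < bl.length := by omega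
    rw [List.getD_eq_getElem _ _ (by omega), List.getD_eq_getElem _ _ hj2]
    simp [List.getElem_take, List.getElem_drop]
  apply flatMap_congr'
  intro y hy
  congr 1
  rw [← range_getD_map ((bl.drop (by_ * Nat.sqrt bl.length)).take (Nat.sqrt bl.length))
        ([] : List (List Int)) (fun blk => blk.getD y []), hslen]
  apply flatMap_congr'
  intro bx hbx
  rw [List.mem_range] at hbx
  rw [hsget bx hbx]
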